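-- pv_equiv track=rewrite | github.com/hfarooqui98/tennis-scorer | proj1.nontiescorer.py | comp101_game
-- ===== SOURCE A (Python) =====
-- def comp101_game(points, server):
--     '''Takes a list of points and the server whos serving and
--     returns the score, winner(if any), extra points(if any)'''
--     score = 0
--     winner = None
--     remainder = []
--     iter_points = points.copy()  # copy points to itterate on without mutation
--     plyr0scr = 0  # Player 0's running total
--     plyr1scr = 0  # Player 1's running total
--     tenis_dict = {0: '0', 1: '15', 2: '30', 3: '40', 4: 'Ad', 5: 'W'}
--
--     # Checking if unstarted game
--     if len(points) == 0:
--         return ('0-0', None, [])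
--
--     # Add scores for plyr0/1 till win or str end,assign leftover to remainder
--     # Initiating a running count of scores
--     for count in points:
--         if count == 0:
--             plyr0scr += 1
--         else:
--             plyr1scr += 1
--         iter_points.pop(0)
--         if (plyr0scr >= 4) or (plyr1scr >= 4):
--
--             # Win plyr0
--             if plyr1scr <= (plyr0scr-2):
--                 plyr0scr = 5
--                 plyr0scr, plyr1scr = tenis_dict[plyr0scr], tenis_dict[plyr1scr]
--                 break
--
--             # Win plyr1
--             elif plyr0scr <= (plyr1scr-2):
--                 plyr1scr = 5
--                 plyr0scr, plyr1scr = tenis_dict[plyr0scr], tenis_dict[plyr1scr]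
--                 break
--
--             # Advantage plyr0
--             elif plyr1scr == (plyr0scr-1):
--                 plyr0scr = 4
--                 plyr1scr = 3
--
--             # Advantage plyr1
--             elif plyr0scr == (plyr1scr-1):
--                 plyr1scr = 4
--                 plyr0scr = 3
--
--             # Duce
--             elif (plyr0scr == 4) and (plyr1scr == 4):
--                 plyr0scr = 3
--                 plyr1scr = 3
--
--     remainder = iter_points
--
--     # Final assignment for 'score' with "Tenis Scoring Scale"
--
--     # Duce and advantage scenarios
--     if type(plyr1scr) is float:
--         plyr0scr, plyr1scr = tenis_dict[plyr0scr], tenis_dict[plyr1scr]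
--         if server == 0:
--             score = ('{}-{}').format(plyr0scr, plyr1scr)
--         else:
--             score = ('{}-{}').format(plyr1scr, plyr0scr)
--
--     # No duce/adv
--     elif (type(plyr1scr) is int) and (type(plyr0scr) is int):
--         plyr0scr, plyr1scr = tenis_dict[plyr0scr], tenis_dict[plyr1scr]
--         if server == 0:
--             score = ('{}-{}').format(plyr0scr, plyr1scr)
--         else:
--             score = ('{}-{}').format(plyr1scr, plyr0scr)
--     else:
--         if server == 0:
--             score = ('{}-{}').format(plyr0scr, plyr1scr)
--         else:
--             score = ('{}-{}').format(plyr1scr, plyr0scr)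
--
--     # Assignment of 'winner' variable
--     if 'W' in score:
--         if plyr0scr == 'W':
--             winner = 0
--         else:
--             winner = 1
--     return (score, winner, remainder)
-- ===== SOURCE B (Python) =====
-- def comp101_game(points, server):
--     '''Takes a list of points and the server whos serving and
--     returns the score, winner(if any), extra points(if any)'''
--     if not points:
--         return ('0-0', None, [])
--     tens = {0: '0', 1: '15', 2: '30', 3: '40'}
--     p0 = p1 = 0
--     end = None
--     for i, pt in enumerate(points):
--         if pt == 0:
--             p0 += 1
--         else:
--             p1 += 1
--         if max(p0, p1) >= 4 and abs(p0 - p1) >= 2: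
--             end = i
--             break
--     if end is not None:
--         remainder = points[end + 1:]
--         if p0 > p1:
--             s0, s1, winner = 'W', tens[min(p1, 3)], 0
--         else:
--             s0, s1, winner = tens[min(p0, 3)], 'W', 1
--     else:
--         remainder = []
--         winner = None
--         if max(p0, p1) < 4:
--             s0, s1 = tens[p0], tens[p1]
--         elif p0 == p1:
--             s0, s1 = '40', '40'
--         elif p0 > p1:
--             s0, s1 = 'Ad', '40'
--         else:
--             s0, s1 = '40', 'Ad'
--     score = '{}-{}'.format(s0, s1) if server == 0 else '{}-{}'.format(s1, s0)
--     return (score, winner, remainder)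
-- ===== Notes on version B (the rewrite author's own statement) =====
-- stated objective: simpler
-- what changed: A interleaves capping/dict-conversion of the running scores inside the scan (with five deuce/advantage branches and mid-loop type switching from ints to strings); B keeps raw cumulative counts in one plain scan that only finds the game-end index, takes the remainder as a slice, and formats the score in a separate final step.
import Mathlib
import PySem

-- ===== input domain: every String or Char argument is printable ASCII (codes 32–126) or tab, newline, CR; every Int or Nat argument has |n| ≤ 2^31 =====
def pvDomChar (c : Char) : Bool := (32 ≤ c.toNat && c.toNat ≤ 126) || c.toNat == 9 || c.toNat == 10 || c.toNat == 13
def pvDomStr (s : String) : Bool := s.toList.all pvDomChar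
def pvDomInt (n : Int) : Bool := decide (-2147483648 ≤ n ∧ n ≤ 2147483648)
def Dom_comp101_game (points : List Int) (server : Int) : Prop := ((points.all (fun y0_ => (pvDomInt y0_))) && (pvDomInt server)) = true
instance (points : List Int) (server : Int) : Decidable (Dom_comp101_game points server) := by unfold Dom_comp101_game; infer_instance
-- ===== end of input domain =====

-- B replaces A's capped running-score loop by one raw-count scan plus a separate
-- formatting step (simpler decomposition); equal return value proved for all inputs.

-- ===== PORT A =====
-- tenis_dict = {0:'0',1:'15',2:'30',3:'40',4:'Ad',5:'W'}
def pvTenis : PySem.Dict Int String :=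
  PySem.Dict.ofList [(0, "0"), (1, "15"), (2, "30"), (3, "40"), (4, "Ad"), (5, "W")]

-- A's for-loop; `iter` mirrors iter_points (iter_points.pop(0) = drop of the head, `.tail`);
-- result: Sum.inl = loop ran out, scores still ints; Sum.inr = break, scores already dict strings.
def comp101_loopA : List Int → List Int → Int → Int → ((Int × Int) ⊕ (String × String)) × List Int
  | [], iter, p0, p1 => (Sum.inl (p0, p1), iter)
  | c :: rest, iter, p0, p1 =>
    let p0' := if c = 0 then p0 + 1 else p0
    let p1' := if c = 0 then p1 else p1 + 1
    let iter' := iter.tail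
    if p0' ≥ 4 ∨ p1' ≥ 4 then
      if p1' ≤ p0' - 2 then (Sum.inr (pvTenis.getD 5 "", pvTenis.getD p1' ""), iter')
      else if p0' ≤ p1' - 2 then (Sum.inr (pvTenis.getD p0' "", pvTenis.getD 5 ""), iter')
      else if p1' = p0' - 1 then comp101_loopA rest iter' 4 3
      else if p0' = p1' - 1 then comp101_loopA rest iter' 3 4
      else if p0' = 4 ∧ p1' = 4 then comp101_loopA rest iter' 3 3
      else comp101_loopA rest iter' p0' p1'
    else comp101_loopA rest iter' p0' p1'

def comp101_game (points : List Int) (server : Int) : String × Option Int × List Int :=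
  if PySem.List.len points = 0 then ("0-0", none, [])
  else
    match comp101_loopA points points 0 0 with
    | (Sum.inl (p0, p1), rem) =>
        -- '(type int, type int)' branch: convert through tenis_dict, then format
        let s0 := pvTenis.getD p0 ""
        let s1 := pvTenis.getD p1 ""
        let score := if server = 0 then s0 ++ "-" ++ s1 else s1 ++ "-" ++ s0
        let winner : Option Int :=
          if PySem.Str.isIn "W" score then (if s0 = "W" then some 0 else some 1) else none
        (score, winner, rem)
    | (Sum.inr (s0, s1), rem) =>
        -- 'else' branch: scores are the strings produced at the break
        let score := if server = 0 then s0 ++ "-" ++ s1 else s1 ++ "-" ++ s0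
        let winner : Option Int :=
          if PySem.Str.isIn "W" score then (if s0 = "W" then some 0 else some 1) else none
        (score, winner, rem)

-- ===== PORT B =====
-- tens = {0:'0',1:'15',2:'30',3:'40'}
def pvTens : PySem.Dict Int String :=
  PySem.Dict.ofList [(0, "0"), (1, "15"), (2, "30"), (3, "40")]

-- Source B's enumerate loop: raw cumulative counts and the first game-end index (none if exhausted)
def comp101_scanB : List Int → Int → Int → Int → Option Int × Int × Int
  | [], _, p0, p1 => (none, p0, p1)
  | pt :: rest, i, p0, p1 =>
    let p0' := if pt = 0 then p0 + 1 else p0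
    let p1' := if pt = 0 then p1 else p1 + 1
    if 4 ≤ max p0' p1' ∧ 2 ≤ (p0' - p1').natAbs then (some i, p0', p1')
    else comp101_scanB rest (i + 1) p0' p1'

def comp101_game_alt (points : List Int) (server : Int) : String × Option Int × List Int :=
  match points with
  | [] => ("0-0", none, [])
  | _ :: _ =>
    match comp101_scanB points 0 0 0 with
    | (some e, p0, p1) =>
        let remainder := PySem.List.slice points (some (e + 1)) none
        let r : String × String × Option Int :=
          if p0 > p1 then ("W", (pvTens.getD (min p1 3) "", some (0 : Int)))
          else (pvTens.getD (min p0 3) "", ("W", some (1 : Int)))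
        (if server = 0 then r.1 ++ "-" ++ r.2.1 else r.2.1 ++ "-" ++ r.1, r.2.2, remainder)
    | (none, p0, p1) =>
        let s : String × String :=
          if max p0 p1 < 4 then (pvTens.getD p0 "", pvTens.getD p1 "")
          else if p0 = p1 then ("40", "40")
          else if p0 > p1 then ("Ad", "40")
          else ("40", "Ad")
        (if server = 0 then s.1 ++ "-" ++ s.2 else s.2 ++ "-" ++ s.1, none, [])

-- ===== PRECONDITION & SPEC =====
def Spec_comp101_game (points : List Int) (server : Int) (out : String × Option Int × List Int) : Prop := out = comp101_game_alt points server
instance (points : List Int) (server : Int) (out : String × Option Int × List Int) : Decidable (Spec_comp101_game points server out) := by unfold Spec_comp101_game; infer_instance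

-- ===== CLAIM (what is proved, stated in full; the proofs are below) =====
def Claim_equal_comp101_game : Prop := ∀ (points : List Int) (server : Int), Dom_comp101_game points server → Spec_comp101_game points server (comp101_game points server)

-- ===== LEMMAS AND PROOFS =====

-- invariant on B's raw counts at the top of each loop iteration
def pvInv (p0 p1 : Int) : Prop :=
  0 ≤ p0 ∧ 0 ≤ p1 ∧ ((p0 ≤ 3 ∧ p1 ≤ 3) ∨ (3 ≤ p0 ∧ 3 ≤ p1 ∧ (p0 - p1).natAbs ≤ 1))

-- A's capped score pair as a function of B's raw counts
def pvCap (p0 p1 : Int) : Int × Int :=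
  if p0 ≤ 3 ∧ p1 ≤ 3 then (p0, p1) else (3 + max (p0 - p1) 0, 3 + max (p1 - p0) 0)

-- the string pair A produces at a break, in terms of B's raw counts
def pvWinStrs (a b : Int) : String × String :=
  if a > b then ("W", pvTens.getD (min b 3) "") else (pvTens.getD (min a 3) "", "W")

-- A's loop result as a function of B's scan result
def pvOut (pts : List Int) (r : Option Int × Int × Int) (iter : List Int) (j : Nat) :
    ((Int × Int) ⊕ (String × String)) × List Int :=
  match r with
  | (none, a, b) => (Sum.inl (pvCap a b), iter.drop pts.length)
  | (some e, a, b) => (Sum.inr (pvWinStrs a b), iter.drop ((e + 1).toNat - j))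

theorem pv_scanB_some (pts : List Int) (i p0 p1 : Int) (e a b : Int)
    (h0 : 0 ≤ p0) (h1 : 0 ≤ p1)
    (h : comp101_scanB pts i p0 p1 = (some e, a, b)) : i ≤ e ∧ 0 ≤ a ∧ 0 ≤ b := by
  induction pts generalizing i p0 p1 with
  | nil => simp [comp101_scanB] at h
  | cons c rest ih =>
    by_cases hc : c = 0 <;>
      simp only [comp101_scanB, hc, if_true, if_false] at h <;>
      split at h
    · simp only [Prod.mk.injEq, Option.some.injEq] at h; omega
    · have := ih (i + 1) (p0 + 1) p1 (by omega) h1 h; omega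
    · simp only [Prod.mk.injEq, Option.some.injEq] at h; omega
    · have := ih (i + 1) p0 (p1 + 1) h0 (by omega) h; omega

theorem pv_scanB_inv (pts : List Int) (i p0 p1 a b : Int) (h : pvInv p0 p1)
    (hs : comp101_scanB pts i p0 p1 = (none, a, b)) : pvInv a b := by
  induction pts generalizing i p0 p1 with
  | nil =>
    simp only [comp101_scanB, Prod.mk.injEq] at hs
    obtain ⟨_, h1, h2⟩ := hs; subst h1; subst h2; exact h
  | cons c rest ih =>
    obtain ⟨h0, h1, hcs⟩ := h
    by_cases hc : c = 0 <;>
      simp only [comp101_scanB, hc, if_true, if_false] at hs <;>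
      split at hs
    · simp at hs
    · exact ih (i + 1) (p0 + 1) p1 ⟨by omega, h1, by rename_i hcond; omega⟩ hs
    · simp at hs
    · exact ih (i + 1) p0 (p1 + 1) ⟨h0, by omega, by rename_i hcond; omega⟩ hs

-- stepping pvOut back over one consumed element / one index position
theorem pv_out_step (c : Int) (rest : List Int) (iter : List Int) (j : Nat) (p0 p1 : Int)
    (h0 : 0 ≤ p0) (h1 : 0 ≤ p1) :
    pvOut rest (comp101_scanB rest ((j : Int) + 1) p0 p1) iter.tail (j + 1) =
      pvOut (c :: rest) (comp101_scanB rest ((j : Int) + 1) p0 p1) iter j := by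
  rcases hr : comp101_scanB rest ((j : Int) + 1) p0 p1 with ⟨e?, a, b⟩
  cases e? with
  | none =>
    simp only [pvOut, ← List.drop_one, List.drop_drop, List.length_cons]
    rw [Nat.add_comm]
  | some e =>
    have he := (pv_scanB_some rest _ p0 p1 e a b h0 h1 hr).1
    simp only [pvOut, ← List.drop_one, List.drop_drop]
    have h2 : 1 + ((e + 1).toNat - (j + 1)) = (e + 1).toNat - j := by omega
    rw [h2]

theorem pv_loop_eq (pts : List Int) (iter : List Int) (j : Nat) (p0 p1 : Int)
    (h : pvInv p0 p1) :
    comp101_loopA pts iter (pvCap p0 p1).1 (pvCap p0 p1).2 =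
      pvOut pts (comp101_scanB pts (j : Int) p0 p1) iter j := by
  induction pts generalizing iter j p0 p1 with
  | nil => simp [comp101_loopA, comp101_scanB, pvOut]
  | cons c rest ih =>
    have cont : ∀ a b q0 q1 : Int, pvInv a b → pvCap a b = (q0, q1) →
        comp101_loopA rest iter.tail q0 q1 =
          pvOut (c :: rest) (comp101_scanB rest ((j : Int) + 1) a b) iter j := by
      intro a b q0 q1 hI hq
      rw [← pv_out_step c rest iter j a b hI.1 hI.2.1]
      rw [show ((j : Int) + 1) = ((j + 1 : Nat) : Int) by push_cast; ring]
      have hih := ih iter.tail (j + 1) a b hI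
      rwa [hq] at hih
    have hj1 : ((j : Int) + 1).toNat - j = 1 := by omega
    obtain ⟨h0, h1, hcs⟩ := h
    rcases hcs with ⟨ha, hb⟩ | ⟨ha, hb, hd⟩
    · -- both raw counts ≤ 3: capped = raw; finitely many states
      have hcap : pvCap p0 p1 = (p0, p1) := by simp [pvCap, ha, hb]
      rw [hcap]
      by_cases hc : c = 0 <;>
        interval_cases p0 <;> interval_cases p1 <;>
        simp only [comp101_loopA, comp101_scanB, hc] <;> norm_num <;>
        first
          | exact cont _ _ _ _ (by exact ⟨by norm_num, by norm_num, by omega⟩) (by decide)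
          | (simp [pvOut, pvWinStrs, pvTens, pvTenis, hj1] <;> decide)
    · -- deuce/advantage region: 3 ≤ both, |diff| ≤ 1
      have hdc : p0 = p1 + 1 ∨ p0 = p1 ∨ p1 = p0 + 1 := by omega
      rcases hdc with hdc | hdc | hdc
      · -- p0 leads by one: capped = (4,3)
        have hcap : pvCap p0 p1 = (4, 3) := by
          simp only [pvCap]; rw [if_neg (by omega)]; simp [Prod.ext_iff]; omega
        rw [hcap]
        by_cases hc : c = 0
        · -- point to p0: both sides break, player 0 wins
          have hscan : comp101_scanB (c :: rest) (j : Int) p0 p1 = (some (j : Int), p0 + 1, p1) := by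
            simp only [comp101_scanB, hc, eq_self_iff_true, if_true, if_false]
            rw [if_pos ⟨by omega, by omega⟩]
          rw [hscan]
          have hm : min p1 3 = 3 := by omega
          simp only [comp101_loopA, hc, eq_self_iff_true, if_true, if_false]
          rw [if_pos (by omega : (4:Int) + 1 ≥ 4 ∨ (3:Int) ≥ 4),
              if_pos (by omega : (3:Int) ≤ 4 + 1 - 2)]
          simp [pvOut, pvWinStrs, hj1, hm, show p1 < p0 + 1 by omega, pvTens, pvTenis] <;> decide
        · -- point to p1: back to deuce, both continue; raw (p0, p1+1), capped (3,3)
          have hscan : comp101_scanB (c :: rest) (j : Int) p0 p1 =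
              comp101_scanB rest ((j : Int) + 1) p0 (p1 + 1) := by
            simp only [comp101_scanB, hc, eq_self_iff_true, if_true, if_false]
            rw [if_neg (by omega)]
          rw [hscan]
          have hA : comp101_loopA (c :: rest) iter 4 3 = comp101_loopA rest iter.tail 3 3 := by
            simp only [comp101_loopA, hc, eq_self_iff_true, if_true, if_false]
            rw [if_pos (by omega : (4:Int) ≥ 4 ∨ (3:Int) + 1 ≥ 4),
                if_neg (by omega : ¬((3:Int) + 1 ≤ 4 - 2)), if_neg (by omega : ¬((4:Int) ≤ 3 + 1 - 2)),
                if_neg (by omega : ¬((3:Int) + 1 = 4 - 1)), if_neg (by omega : ¬((4:Int) = 3 + 1 - 1)),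
                if_pos (by norm_num)]
          rw [hA]
          exact cont p0 (p1 + 1) 3 3 ⟨by omega, by omega, Or.inr ⟨by omega, by omega, by omega⟩⟩
            (by simp only [pvCap]; by_cases hp : p0 ≤ 3 ∧ p1 + 1 ≤ 3
                · rw [if_pos hp]; simp [Prod.ext_iff]; omega
                · rw [if_neg hp]; simp [Prod.ext_iff]; omega)
      · -- tied at deuce: capped = (3,3)
        have hcap : pvCap p0 p1 = (3, 3) := by
          simp only [pvCap]; by_cases hp : p0 ≤ 3 ∧ p1 ≤ 3
          · rw [if_pos hp]; simp [Prod.ext_iff]; omega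
          · rw [if_neg hp]; simp [Prod.ext_iff]; omega
        rw [hcap]
        by_cases hc : c = 0
        · -- point to p0: advantage p0, both continue; raw (p0+1, p1), capped (4,3)
          have hscan : comp101_scanB (c :: rest) (j : Int) p0 p1 =
              comp101_scanB rest ((j : Int) + 1) (p0 + 1) p1 := by
            simp only [comp101_scanB, hc, eq_self_iff_true, if_true, if_false]
            rw [if_neg (by omega)]
          rw [hscan]
          have hA : comp101_loopA (c :: rest) iter 3 3 = comp101_loopA rest iter.tail 4 3 := by
            simp only [comp101_loopA, hc, eq_self_iff_true, if_true, if_false]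
            rw [if_pos (by omega : (3:Int) + 1 ≥ 4 ∨ (3:Int) ≥ 4),
                if_neg (by omega : ¬((3:Int) ≤ 3 + 1 - 2)), if_neg (by omega : ¬((3:Int) + 1 ≤ 3 - 2)),
                if_pos (by omega : (3:Int) = 3 + 1 - 1)]
          rw [hA]
          exact cont (p0 + 1) p1 4 3 ⟨by omega, by omega, Or.inr ⟨by omega, by omega, by omega⟩⟩
            (by simp only [pvCap]; rw [if_neg (by omega)]; simp [Prod.ext_iff]; omega)
        · -- point to p1: advantage p1, both continue; raw (p0, p1+1), capped (3,4)
          have hscan : comp101_scanB (c :: rest) (j : Int) p0 p1 =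
              comp101_scanB rest ((j : Int) + 1) p0 (p1 + 1) := by
            simp only [comp101_scanB, hc, eq_self_iff_true, if_true, if_false]
            rw [if_neg (by omega)]
          rw [hscan]
          have hA : comp101_loopA (c :: rest) iter 3 3 = comp101_loopA rest iter.tail 3 4 := by
            simp only [comp101_loopA, hc, eq_self_iff_true, if_true, if_false]
            rw [if_pos (by omega : (3:Int) ≥ 4 ∨ (3:Int) + 1 ≥ 4),
                if_neg (by omega : ¬((3:Int) + 1 ≤ 3 - 2)), if_neg (by omega : ¬((3:Int) ≤ 3 + 1 - 2)),
                if_neg (by omega : ¬((3:Int) + 1 = 3 - 1)), if_pos (by omega : (3:Int) = 3 + 1 - 1)]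
          rw [hA]
          exact cont p0 (p1 + 1) 3 4 ⟨by omega, by omega, Or.inr ⟨by omega, by omega, by omega⟩⟩
            (by simp only [pvCap]; rw [if_neg (by omega)]; simp [Prod.ext_iff]; omega)
      · -- p1 leads by one: capped = (3,4)
        have hcap : pvCap p0 p1 = (3, 4) := by
          simp only [pvCap]; rw [if_neg (by omega)]; simp [Prod.ext_iff]; omega
        rw [hcap]
        by_cases hc : c = 0
        · -- point to p0: back to deuce, both continue; raw (p0+1, p1), capped (3,3)
          have hscan : comp101_scanB (c :: rest) (j : Int) p0 p1 =
              comp101_scanB rest ((j : Int) + 1) (p0 + 1) p1 := by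
            simp only [comp101_scanB, hc, eq_self_iff_true, if_true, if_false]
            rw [if_neg (by omega)]
          rw [hscan]
          have hA : comp101_loopA (c :: rest) iter 3 4 = comp101_loopA rest iter.tail 3 3 := by
            simp only [comp101_loopA, hc, eq_self_iff_true, if_true, if_false]
            rw [if_pos (by omega : (3:Int) + 1 ≥ 4 ∨ (4:Int) ≥ 4),
                if_neg (by omega : ¬((4:Int) ≤ 3 + 1 - 2)), if_neg (by omega : ¬((3:Int) + 1 ≤ 4 - 2)),
                if_neg (by omega : ¬((4:Int) = 3 + 1 - 1)), if_neg (by omega : ¬((3:Int) + 1 = 4 - 1)),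
                if_pos (by norm_num)]
          rw [hA]
          exact cont (p0 + 1) p1 3 3 ⟨by omega, by omega, Or.inr ⟨by omega, by omega, by omega⟩⟩
            (by simp only [pvCap]; rw [if_neg (by omega)]; simp [Prod.ext_iff]; omega)
        · -- point to p1: both sides break, player 1 wins
          have hscan : comp101_scanB (c :: rest) (j : Int) p0 p1 = (some (j : Int), p0, p1 + 1) := by
            simp only [comp101_scanB, hc, eq_self_iff_true, if_true, if_false]
            rw [if_pos ⟨by omega, by omega⟩]
          rw [hscan]
          have hm : min p0 3 = 3 := by omega
          simp only [comp101_loopA, hc, eq_self_iff_true, if_true, if_false]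
          rw [if_pos (by omega : (3:Int) ≥ 4 ∨ (4:Int) + 1 ≥ 4),
              if_neg (by omega : ¬((4:Int) + 1 ≤ 3 - 2)),
              if_pos (by omega : (3:Int) ≤ 4 + 1 - 2)]
          simp [pvOut, pvWinStrs, hj1, hm, show ¬(p1 + 1 < p0) by omega, pvTens, pvTenis] <;> decide

theorem pv_game_eq (points : List Int) (server : Int) :
    comp101_game points server = comp101_game_alt points server := by
  cases points with
  | nil => rfl
  | cons c rest =>
    have hlen : ¬ (PySem.List.len (c :: rest) = 0) := by simp [PySem.List.len_eq]; omega
    have hl0 := pv_loop_eq (c :: rest) (c :: rest) 0 0 0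
      ⟨le_refl 0, le_refl 0, Or.inl ⟨by norm_num, by norm_num⟩⟩
    rw [Nat.cast_zero] at hl0
    have hl : comp101_loopA (c :: rest) (c :: rest) 0 0 =
        pvOut (c :: rest) (comp101_scanB (c :: rest) 0 0 0) (c :: rest) 0 := hl0
    simp only [comp101_game, comp101_game_alt]
    rw [if_neg hlen, hl]
    rcases hs : comp101_scanB (c :: rest) 0 0 0 with ⟨e?, a, b⟩
    cases e? with
    | some e =>
      have hse := pv_scanB_some (c :: rest) 0 0 0 e a b le_rfl le_rfl hs
      simp only [pvOut, Nat.sub_zero]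
      rw [show (e + 1 : Int) = ((e.toNat + 1 : Nat) : Int) by omega,
          PySem.List.slice_from_natCast]
      simp only [Int.toNat_natCast]
      by_cases hab : a > b
      · have hm : min b 3 = 0 ∨ min b 3 = 1 ∨ min b 3 = 2 ∨ min b 3 = 3 := by omega
        simp only [pvWinStrs, if_pos hab]
        rcases hm with hm | hm | hm | hm <;> rw [hm] <;>
          by_cases hsv : server = 0 <;> simp [hsv] <;> decide
      · have hm : min a 3 = 0 ∨ min a 3 = 1 ∨ min a 3 = 2 ∨ min a 3 = 3 := by omega
        simp only [pvWinStrs, if_neg hab]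
        rcases hm with hm | hm | hm | hm <;> rw [hm] <;>
          by_cases hsv : server = 0 <;> simp [hsv] <;> decide
    | none =>
      have hInv := pv_scanB_inv (c :: rest) 0 0 0 a b
        ⟨le_rfl, le_rfl, Or.inl ⟨by norm_num, by norm_num⟩⟩ hs
      simp only [pvOut, List.drop_length]
      obtain ⟨ha0, hb0, hcs⟩ := hInv
      rcases hcs with ⟨ha3, hb3⟩ | ⟨ha3, hb3, hd⟩
      · have hcap : pvCap a b = (a, b) := by simp [pvCap, ha3, hb3]
        rw [hcap, if_pos (by omega : max a b < 4)]
        interval_cases a <;> interval_cases b <;>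
          by_cases hsv : server = 0 <;> simp [hsv] <;> decide
      · rcases (by omega : a = b + 1 ∨ a = b ∨ b = a + 1) with hdc | hdc | hdc
        · -- a leads by one: A shows Ad-40
          have hcap : pvCap a b = (4, 3) := by
            simp only [pvCap]; rw [if_neg (by omega)]; simp [Prod.ext_iff]; omega
          rw [hcap, if_neg (by omega : ¬ max a b < 4), if_neg (by omega : ¬ a = b),
              if_pos (by omega : a > b)]
          by_cases hsv : server = 0 <;> simp [hsv] <;> decide
        · -- tied: both show 40-40
          have hcap : pvCap a b = (3, 3) := by
            simp only [pvCap]; by_cases hp : a ≤ 3 ∧ b ≤ 3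
            · rw [if_pos hp]; simp [Prod.ext_iff]; omega
            · rw [if_neg hp]; simp [Prod.ext_iff]; omega
          rw [hcap]
          by_cases h4 : max a b < 4
          · rw [if_pos h4]
            have haa : a = 3 := by omega
            have hbb : b = 3 := by omega
            subst haa; subst hbb
            by_cases hsv : server = 0 <;> simp [hsv] <;> decide
          · rw [if_neg h4, if_pos hdc]
            by_cases hsv : server = 0 <;> simp [hsv] <;> decide
        · -- b leads by one: A shows 40-Ad
          have hcap : pvCap a b = (3, 4) := by
            simp only [pvCap]; rw [if_neg (by omega)]; simp [Prod.ext_iff]; omega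
          rw [hcap, if_neg (by omega : ¬ max a b < 4), if_neg (by omega : ¬ a = b),
              if_neg (by omega : ¬ a > b)]
          by_cases hsv : server = 0 <;> simp [hsv] <;> decide

-- ===== VERDICT (by name: the statement is the Claim_ definition above) =====
theorem comp101_game_spec : Claim_equal_comp101_game := by
  unfold Claim_equal_comp101_game Spec_comp101_game
  intro points server _
  exact pv_game_eq points server
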